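-- pv_equiv track=rewrite | github.com/umut-h-toprak/PhD_Dissertation_codebase | 06-cohortAnalysisForEPISTEME/WES/common/tools.py | cleanupLowSupportMidSized
-- ===== SOURCE A (Python) =====
-- def cleanupLowSupportMidSized(preResultsAfterAllOtherFilters):
--     score3Count=0
--     score4Count=0
--     for svChunks in preResultsAfterAllOtherFilters:
--         if svChunks[0]==svChunks[3]:
--             eventSize=int(svChunks[10])
--             eventScore=int(svChunks[9])
--             if eventSize<700:
--                 if eventScore==3:
--                     score3Count += 1
--                 if eventScore == 4:
--                     score4Count += 1
--     if score3Count + score4Count > 300: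
--         filteredSvChunks=[]
--         for svChunks in preResultsAfterAllOtherFilters:
--             blacklistSv=False
--             if svChunks[0] == svChunks[3]:
--                 eventSize = int(svChunks[10])
--                 eventScore = int(svChunks[9])
--                 if eventSize < 700:
--                     if eventScore == 3:
--                         blacklistSv = True
--             if not blacklistSv:
--                 filteredSvChunks.append(svChunks)
--         if score4Count > 50:
--             strongerFilteredSvChunks=[]
--             for svChunks in filteredSvChunks:
--                 blacklistSv = False
--                 if svChunks[0] == svChunks[3]:
--                     eventSize = int(svChunks[10])
--                     eventScore = int(svChunks[9])
--                     if eventSize < 700: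
--                         if eventScore == 4:
--                             blacklistSv=True
--                 if not blacklistSv:
--                     strongerFilteredSvChunks.append(svChunks)
--             return strongerFilteredSvChunks
--         return filteredSvChunks
--     return preResultsAfterAllOtherFilters
-- ===== SOURCE B (Python) =====
-- def cleanupLowSupportMidSized(preResultsAfterAllOtherFilters):
--     score3Count = 0
--     score4Count = 0
--     for svChunks in preResultsAfterAllOtherFilters:
--         if svChunks[0] == svChunks[3] and int(svChunks[10]) < 700:
--             eventScore = int(svChunks[9])
--             if eventScore == 3:
--                 score3Count += 1
--             elif eventScore == 4:
--                 score4Count += 1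
--     if score3Count + score4Count <= 300:
--         return preResultsAfterAllOtherFilters
--     blacklistScores = {3, 4} if score4Count > 50 else {3}
--     return [svChunks for svChunks in preResultsAfterAllOtherFilters
--             if not (svChunks[0] == svChunks[3]
--                     and int(svChunks[10]) < 700
--                     and int(svChunks[9]) in blacklistScores)]
-- ===== Notes on version B (the rewrite author's own statement) =====
-- stated objective: simpler
-- what changed: Replaces A's two sequential append-loop filtering passes with one counting pass plus a single comprehension driven by a computed blacklist score set.
import Mathlib
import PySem

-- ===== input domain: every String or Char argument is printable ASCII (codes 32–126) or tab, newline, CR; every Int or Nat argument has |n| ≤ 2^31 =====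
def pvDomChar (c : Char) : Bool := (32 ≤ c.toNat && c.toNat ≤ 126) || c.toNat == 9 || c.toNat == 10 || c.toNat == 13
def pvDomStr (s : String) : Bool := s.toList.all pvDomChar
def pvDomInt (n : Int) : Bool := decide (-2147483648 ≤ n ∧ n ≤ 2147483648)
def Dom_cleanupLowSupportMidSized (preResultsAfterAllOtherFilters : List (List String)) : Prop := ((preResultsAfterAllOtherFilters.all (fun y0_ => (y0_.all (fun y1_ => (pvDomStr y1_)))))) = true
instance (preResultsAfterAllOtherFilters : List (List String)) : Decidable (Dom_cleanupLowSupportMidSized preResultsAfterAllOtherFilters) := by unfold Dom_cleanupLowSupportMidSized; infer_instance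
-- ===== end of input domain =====

-- B replaces A's two sequential filtering passes by one comprehension over a computed blacklist score set (objective: simpler).

-- shared totalized primitives (exact under Pre_, which rules out IndexError/ValueError)
def pvGetS (r : List String) (i : Int) : String := (PySem.List.pyGet? r i).getD ""
def pvInt (s : String) : Int := (PySem.Int.ofStr? s).getD 0

-- ===== PORT A =====
def cleanupLowSupportMidSized (preResultsAfterAllOtherFilters : List (List String)) : List (List String) :=
  let counts : Int × Int := preResultsAfterAllOtherFilters.foldl (fun c svChunks =>
      if pvGetS svChunks 0 == pvGetS svChunks 3 then
        let eventSize := pvInt (pvGetS svChunks 10)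
        let eventScore := pvInt (pvGetS svChunks 9)
        if eventSize < 700 then
          (if eventScore == 3 then c.1 + 1 else c.1,
           if eventScore == 4 then c.2 + 1 else c.2)
        else c
      else c) (0, 0)
  if counts.1 + counts.2 > 300 then
    let filteredSvChunks := preResultsAfterAllOtherFilters.foldl (fun acc svChunks =>
        let blacklistSv :=
          if pvGetS svChunks 0 == pvGetS svChunks 3 then
            if pvInt (pvGetS svChunks 10) < 700 then pvInt (pvGetS svChunks 9) == 3 else false
          else false
        if !blacklistSv then acc ++ [svChunks] else acc) []
    if counts.2 > 50 then
      filteredSvChunks.foldl (fun acc svChunks =>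
        let blacklistSv :=
          if pvGetS svChunks 0 == pvGetS svChunks 3 then
            if pvInt (pvGetS svChunks 10) < 700 then pvInt (pvGetS svChunks 9) == 4 else false
          else false
        if !blacklistSv then acc ++ [svChunks] else acc) []
    else filteredSvChunks
  else preResultsAfterAllOtherFilters

-- ===== PORT B =====
def pvBlacklisted (blacklistScores : PySem.Set Int) (svChunks : List String) : Bool :=
  pvGetS svChunks 0 == pvGetS svChunks 3
    && decide (pvInt (pvGetS svChunks 10) < 700)
    && PySem.Set.contains blacklistScores (pvInt (pvGetS svChunks 9))

def cleanupLowSupportMidSized_alt (preResultsAfterAllOtherFilters : List (List String)) : List (List String) :=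
  let counts : Int × Int := preResultsAfterAllOtherFilters.foldl (fun c svChunks =>
      if pvGetS svChunks 0 == pvGetS svChunks 3 && decide (pvInt (pvGetS svChunks 10) < 700) then
        let eventScore := pvInt (pvGetS svChunks 9)
        if eventScore == 3 then (c.1 + 1, c.2)
        else if eventScore == 4 then (c.1, c.2 + 1)
        else c
      else c) (0, 0)
  if counts.1 + counts.2 ≤ 300 then preResultsAfterAllOtherFilters
  else
    let blacklistScores : PySem.Set Int :=
      if counts.2 > 50 then PySem.Set.ofList [3, 4] else PySem.Set.ofList [3]
    preResultsAfterAllOtherFilters.filter (fun svChunks => !pvBlacklisted blacklistScores svChunks)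

-- ===== PRECONDITION & SPEC =====
-- Pre_ excludes exactly the inputs on which A raises: a row shorter than 4 (IndexError at svChunks[3]),
-- and a row with svChunks[0]==svChunks[3] that is shorter than 11 or whose fields 9/10 are not int literals.
def Pre_cleanupLowSupportMidSized (preResultsAfterAllOtherFilters : List (List String)) : Prop :=
  ∀ r ∈ preResultsAfterAllOtherFilters, 4 ≤ r.length ∧
    (pvGetS r 0 = pvGetS r 3 →
      11 ≤ r.length ∧ (PySem.Int.ofStr? (pvGetS r 9)).isSome ∧ (PySem.Int.ofStr? (pvGetS r 10)).isSome)
instance (preResultsAfterAllOtherFilters : List (List String)) : Decidable (Pre_cleanupLowSupportMidSized preResultsAfterAllOtherFilters) := by unfold Pre_cleanupLowSupportMidSized; infer_instance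
def pvWitness_cleanupLowSupportMidSized : List (List String) :=
  [["x", "a", "b", "y", "c", "d", "e", "f", "g", "3", "100"],
   ["x", "a", "b", "x", "c", "d", "e", "f", "g", "3", "100"]]
def Spec_cleanupLowSupportMidSized (preResultsAfterAllOtherFilters : List (List String)) (out : List (List String)) : Prop := out = cleanupLowSupportMidSized_alt preResultsAfterAllOtherFilters
instance (preResultsAfterAllOtherFilters : List (List String)) (out : List (List String)) : Decidable (Spec_cleanupLowSupportMidSized preResultsAfterAllOtherFilters out) := by unfold Spec_cleanupLowSupportMidSized; infer_instance

-- ===== CLAIM (what is proved, stated in full; the proofs are below) =====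
def Claim_equal_cleanupLowSupportMidSized : Prop := ∀ (preResultsAfterAllOtherFilters : List (List String)), Dom_cleanupLowSupportMidSized preResultsAfterAllOtherFilters → Pre_cleanupLowSupportMidSized preResultsAfterAllOtherFilters → Spec_cleanupLowSupportMidSized preResultsAfterAllOtherFilters (cleanupLowSupportMidSized preResultsAfterAllOtherFilters)

-- ===== LEMMAS AND PROOFS =====

-- A's blacklist tests, as predicates (proof-side shorthand)
def pvBl3 (r : List String) : Bool :=
  if pvGetS r 0 == pvGetS r 3 then
    if pvInt (pvGetS r 10) < 700 then pvInt (pvGetS r 9) == 3 else false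
  else false
def pvBl4 (r : List String) : Bool :=
  if pvGetS r 0 == pvGetS r 3 then
    if pvInt (pvGetS r 10) < 700 then pvInt (pvGetS r 9) == 4 else false
  else false

lemma counts_eq (xs : List (List String)) (c : Int × Int) :
    xs.foldl (fun c svChunks =>
      if pvGetS svChunks 0 == pvGetS svChunks 3 then
        let eventSize := pvInt (pvGetS svChunks 10)
        let eventScore := pvInt (pvGetS svChunks 9)
        if eventSize < 700 then
          (if eventScore == 3 then c.1 + 1 else c.1,
           if eventScore == 4 then c.2 + 1 else c.2)
        else c
      else c) c
    = xs.foldl (fun c svChunks =>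
      if pvGetS svChunks 0 == pvGetS svChunks 3 && decide (pvInt (pvGetS svChunks 10) < 700) then
        let eventScore := pvInt (pvGetS svChunks 9)
        if eventScore == 3 then (c.1 + 1, c.2)
        else if eventScore == 4 then (c.1, c.2 + 1)
        else c
      else c) c := by
  apply PySem.List.foldl_congr_mem
  intro acc r _
  by_cases h0 : (pvGetS r 0 == pvGetS r 3) = true <;>
  by_cases h1 : pvInt (pvGetS r 10) < 700 <;>
  by_cases h3 : pvInt (pvGetS r 9) = 3 <;>
  by_cases h4 : pvInt (pvGetS r 9) = 4 <;>
    simp_all [Bool.beq_eq_decide_eq]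

lemma bl3_or_bl4 (r : List String) :
    (!pvBl4 r && !pvBl3 r) = !pvBlacklisted (PySem.Set.ofList [3, 4]) r := by
  simp only [pvBl3, pvBl4, pvBlacklisted]
  by_cases h0 : (pvGetS r 0 == pvGetS r 3) = true <;>
  by_cases h1 : pvInt (pvGetS r 10) < 700 <;>
  by_cases h3 : pvInt (pvGetS r 9) = 3 <;>
  by_cases h4 : pvInt (pvGetS r 9) = 4 <;>
    simp_all [Bool.beq_eq_decide_eq, PySem.Set.contains, PySem.Set.ofList, PySem.Set.add]

lemma bl3_only (r : List String) :
    (!pvBl3 r) = !pvBlacklisted (PySem.Set.ofList [3]) r := by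
  simp only [pvBl3, pvBlacklisted]
  by_cases h0 : (pvGetS r 0 == pvGetS r 3) = true <;>
  by_cases h1 : pvInt (pvGetS r 10) < 700 <;>
    simp_all [Bool.beq_eq_decide_eq, PySem.Set.contains, PySem.Set.ofList, PySem.Set.add]

lemma filter3_eq (xs : List (List String)) :
    xs.foldl (fun acc svChunks =>
        if !(if pvGetS svChunks 0 == pvGetS svChunks 3 then
               if pvInt (pvGetS svChunks 10) < 700 then pvInt (pvGetS svChunks 9) == 3 else false
             else false) then acc ++ [svChunks] else acc) []
    = xs.filter (fun r => !pvBl3 r) := by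
  have h := PySem.List.foldl_append_if (fun r => !pvBl3 r) (fun r => r) xs []
  simpa [pvBl3] using h

lemma filter4_eq (xs : List (List String)) :
    xs.foldl (fun acc svChunks =>
        if !(if pvGetS svChunks 0 == pvGetS svChunks 3 then
               if pvInt (pvGetS svChunks 10) < 700 then pvInt (pvGetS svChunks 9) == 4 else false
             else false) then acc ++ [svChunks] else acc) []
    = xs.filter (fun r => !pvBl4 r) := by
  have h := PySem.List.foldl_append_if (fun r => !pvBl4 r) (fun r => r) xs []
  simpa [pvBl4] using h

-- ===== VERDICT (by name: the statement is the Claim_ definition above) =====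
theorem cleanupLowSupportMidSized_spec : Claim_equal_cleanupLowSupportMidSized := by
  intro xs _ _
  unfold Spec_cleanupLowSupportMidSized cleanupLowSupportMidSized cleanupLowSupportMidSized_alt
  rw [counts_eq]
  simp only []
  set c := xs.foldl (fun c svChunks =>
      if pvGetS svChunks 0 == pvGetS svChunks 3 && decide (pvInt (pvGetS svChunks 10) < 700) then
        let eventScore := pvInt (pvGetS svChunks 9)
        if eventScore == 3 then (c.1 + 1, c.2)
        else if eventScore == 4 then (c.1, c.2 + 1)
        else c
      else c) ((0 : Int), (0 : Int)) with hc
  by_cases hgt : c.1 + c.2 > 300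
  · rw [if_pos hgt, if_neg (by omega : ¬ c.1 + c.2 ≤ 300)]
    rw [filter3_eq]
    by_cases h50 : c.2 > 50
    · rw [if_pos h50, if_pos h50, filter4_eq, List.filter_filter]
      exact List.filter_congr (fun r _ => bl3_or_bl4 r)
    · rw [if_neg h50, if_neg h50]
      exact List.filter_congr (fun r _ => bl3_only r)
  · rw [if_neg hgt, if_pos (by omega : c.1 + c.2 ≤ 300)]
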